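-- pv_equiv track=rewrite | github.com/MeTaLGearAcy/CSC361-Smart-Web-Client | Assignment3/TracerouteAnalyzer/utils.py | int_to_ipv6
-- ===== SOURCE A (Python) =====
-- def int_to_ipv6(ip: tuple):
--     """
--     Convert integer tuple to IPv6 address string. Like fd12:3456:7890::1.
--
--     :param ip: IPv6 address in integer.
--     :return: IPv6 string.
--     """
--     __return_ip = ""
--     for i in range(len(ip)):
--         if i == 0:
--             __return_ip += hex(ip[i])[2:] + ":"
--             continue
--         if ip[i] == 0 and ip[i - 1] == 0:
--             continue
--         if ip[i] == 0:
--             __return_ip += ":"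
--             continue
--         __return_ip += hex(ip[i])[2:] + ":"
--     return __return_ip[:-1]
-- ===== SOURCE B (Python) =====
-- def int_to_ipv6(ip: tuple):
--     """Convert integer tuple to IPv6 address string (run-based: scan zero/nonzero
--     runs of the tail and join pieces with ':', an empty piece marking a collapsed
--     zero run)."""
--     if not ip:
--         return ""
--     pieces = [hex(ip[0])[2:]]
--     i = 1
--     n = len(ip)
--     while i < n:
--         if ip[i] == 0:
--             if i > 1 or ip[0] != 0:
--                 pieces.append("")
--             while i < n and ip[i] == 0:
--                 i += 1
--         else:
--             pieces.append(hex(ip[i])[2:])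
--             i += 1
--     return ":".join(pieces)
-- ===== Notes on version B (the rewrite author's own statement) =====
-- stated objective: alternative
-- what changed: Replaces A's per-index loop with look-back at ip[i-1] plus a final trailing-':' trim by a run scanner: the first group is emitted, then the tail is traversed by zero/nonzero runs, a collapsed zero run contributing one empty piece, and the pieces are joined with ':'.
import Mathlib
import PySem

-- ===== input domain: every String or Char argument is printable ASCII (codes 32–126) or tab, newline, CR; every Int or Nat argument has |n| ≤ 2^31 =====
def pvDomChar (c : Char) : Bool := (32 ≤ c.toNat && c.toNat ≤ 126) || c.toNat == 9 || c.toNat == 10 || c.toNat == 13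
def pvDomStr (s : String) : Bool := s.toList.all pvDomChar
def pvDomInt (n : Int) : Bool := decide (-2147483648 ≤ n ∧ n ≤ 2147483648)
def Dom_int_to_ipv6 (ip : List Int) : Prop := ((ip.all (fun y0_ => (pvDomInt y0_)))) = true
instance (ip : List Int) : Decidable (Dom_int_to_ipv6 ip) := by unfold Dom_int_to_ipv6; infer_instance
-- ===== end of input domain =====

-- B re-implements the same tuple→IPv6-string conversion by scanning zero/nonzero RUNS of the
-- tail and joining pieces with ':' (an empty piece marks a collapsed zero run), instead of A's
-- per-index look-back loop with a trailing-':' trim; same cost, different decomposition.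


-- ===== PORT A =====
-- hex(n)[2:] as a list of chars: exact for every Python int (hex gives lowercase digits,
-- '-0x…'[2:] = 'x…' for negatives, '0x0'[2:] = '0'); Nat.toDigits 16 is Python's lowercase hex.
def pyHexChars (n : Int) : List Char :=
  if n < 0 then 'x' :: Nat.toDigits 16 (-n).toNat else Nat.toDigits 16 n.toNat

-- literal transliteration of A: index loop over range(len(ip)) with look-back at ip[i-1],
-- appending "h:"/":"/nothing to the accumulator, then the final [:-1] slice.
def int_to_ipv6 (ip : List Int) : String :=
  let r : List Char :=
    (PySem.List.pyRange 0 (ip.length : Int) 1).foldl (fun acc i =>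
      if i == 0 then acc ++ pyHexChars (PySem.List.pyGetD ip i 0) ++ [':']
      else if PySem.List.pyGetD ip i 0 == 0 && PySem.List.pyGetD ip (i - 1) 0 == 0 then acc
      else if PySem.List.pyGetD ip i 0 == 0 then acc ++ [':']
      else acc ++ pyHexChars (PySem.List.pyGetD ip i 0) ++ [':']) []
  String.ofList (PySem.List.slice r none (some (-1)))

-- ===== PORT B =====
-- run scanner over the tail: a zero run becomes one empty piece (none if it directly extends a
-- zero first group), a nonzero element its hex piece; prevZero = "a zero run here would extend ip[0] = 0".
def bPieces : List Int → Bool → List (List Char)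
  | [], _ => []
  | x :: xs, prevZero =>
    if x == 0 then
      let rest := xs.dropWhile (· == 0)
      if prevZero then bPieces rest false else [] :: bPieces rest false
    else pyHexChars x :: bPieces xs false
  termination_by l _ => l.length
  decreasing_by
  · exact Nat.lt_succ_of_le (xs.length_dropWhile_le _)
  · exact Nat.lt_succ_of_le (xs.length_dropWhile_le _)
  · simp

def int_to_ipv6_alt (ip : List Int) : String :=
  match ip with
  | [] => ""
  | x :: xs => String.ofList (PySem.Chars.join [':'] (pyHexChars x :: bPieces xs (x == 0)))

-- ===== PRECONDITION & SPEC =====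
def Spec_int_to_ipv6 (ip : List Int) (out : String) : Prop := out = int_to_ipv6_alt ip
instance (ip : List Int) (out : String) : Decidable (Spec_int_to_ipv6 ip out) := by unfold Spec_int_to_ipv6; infer_instance

-- ===== CLAIM (what is proved, stated in full; the proofs are below) =====
def Claim_equal_int_to_ipv6 : Prop := ∀ (ip : List Int), Dom_int_to_ipv6 ip → Spec_int_to_ipv6 ip (int_to_ipv6 ip)

-- ===== LEMMAS AND PROOFS =====

-- the characters A's loop body appends while scanning the tail (prev = previous element)
def emitA : List Int → Int → List Char
  | [], _ => []
  | x :: xs, prev =>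
    (if x = 0 ∧ prev = 0 then [] else if x = 0 then [':'] else pyHexChars x ++ [':']) ++ emitA xs x

-- A's fold over range(k, len(ip)) (1 ≤ k) appends exactly emitA of the remaining suffix
theorem foldA (ip : List Int) (k : Nat) (hk : 1 ≤ k) (acc : List Char) :
    (PySem.List.pyRange (k : Int) (ip.length : Int) 1).foldl (fun acc i =>
      if i == 0 then acc ++ pyHexChars (PySem.List.pyGetD ip i 0) ++ [':']
      else if PySem.List.pyGetD ip i 0 == 0 && PySem.List.pyGetD ip (i - 1) 0 == 0 then acc
      else if PySem.List.pyGetD ip i 0 == 0 then acc ++ [':']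
      else acc ++ pyHexChars (PySem.List.pyGetD ip i 0) ++ [':']) acc
    = acc ++ emitA (ip.drop k) (ip.getD (k - 1) 0) := by
  by_cases hlt : k < ip.length
  · rw [PySem.List.pyRange_one_cons (by exact_mod_cast hlt), List.foldl_cons]
    have hk0 : ((k : Int) == 0) = false := by simp; omega
    have hcur : PySem.List.pyGetD ip (k : Int) 0 = ip.getD k 0 := PySem.List.pyGetD_natCast ip k 0
    have hprev : PySem.List.pyGetD ip ((k : Int) - 1) 0 = ip.getD (k - 1) 0 := by
      have : (k : Int) - 1 = ((k - 1 : Nat) : Int) := by omega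
      rw [this]; exact PySem.List.pyGetD_natCast ip (k - 1) 0
    have hsucc : ((k : Int) + 1) = ((k + 1 : Nat) : Int) := by push_cast; ring
    rw [hk0, hcur, hprev, hsucc, foldA ip (k + 1) (by omega) _]
    rw [List.drop_eq_getElem_cons hlt]
    rw [List.getD_eq_getElem ip 0 hlt]
    simp only [emitA, Nat.add_sub_cancel, List.getD_eq_getElem ip 0 hlt]
    by_cases h1 : ip[k] = 0 <;> by_cases h2 : ip.getD (k - 1) 0 = 0 <;>
      simp only [List.getD_eq_getElem?_getD] at h2 <;> simp [h1, h2, List.append_assoc]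
  · rw [PySem.List.pyRange_one_eq_nil (by exact_mod_cast Nat.le_of_not_lt hlt),
        List.drop_eq_nil_of_le (Nat.le_of_not_lt hlt)]
    simp [emitA]
termination_by ip.length - k

-- the flag only matters for a zero run at the very front: with the flag set it is skipped whole
theorem bPieces_true (xs : List Int) :
    bPieces xs true = bPieces (xs.dropWhile (· == 0)) false := by
  cases xs with
  | nil => simp [bPieces]
  | cons x ys =>
    by_cases hx : x = 0
    · simp [bPieces, hx]
    · simp [bPieces, (by simp [hx] : (x == 0) = false)]

-- core correspondence: A's tail emission (with its trailing ':' trimmed) is B's pieces,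
-- each preceded by a ':'
theorem emitA_eq_bPieces (t : List Int) (prev : Int) :
    ([':'] ++ emitA t prev).dropLast = (bPieces t (prev == 0)).flatMap (fun p => ':' :: p) := by
  induction t generalizing prev with
  | nil => simp [emitA, bPieces]
  | cons x xs ih =>
    by_cases hx : x = 0
    · by_cases hp : prev = 0
      · have : bPieces (x :: xs) (prev == 0) = bPieces (xs.dropWhile (· == 0)) false := by
          simp [bPieces, hx, hp]
        rw [this, ← bPieces_true, ← (by simp : ((0 : Int) == 0) = true)]
        simpa [emitA, hx, hp] using ih 0
      · have hb : bPieces (x :: xs) (prev == 0) = [] :: bPieces (xs.dropWhile (· == 0)) false := by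
          simp [bPieces, hx, hp]
        rw [hb]
        have lhs : ([':'] ++ emitA (x :: xs) prev) = ':' :: ([':'] ++ emitA xs 0) := by
          simp [emitA, hx, hp]
        rw [lhs, List.dropLast_cons_of_ne_nil (by simp)]
        rw [(by simpa using ih 0 : ([':'] ++ emitA xs 0).dropLast
              = (bPieces xs true).flatMap (fun p => ':' :: p)), bPieces_true]
        simp
    · have hb : bPieces (x :: xs) (prev == 0) = pyHexChars x :: bPieces xs false := by
        simp [bPieces, hx]
      rw [hb]
      have lhs : ([':'] ++ emitA (x :: xs) prev)
          = (':' :: pyHexChars x) ++ ([':'] ++ emitA xs x) := by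
        simp [emitA, hx]
      rw [lhs, List.dropLast_append_of_ne_nil (by simp)]
      rw [(by simpa using ih x : ([':'] ++ emitA xs x).dropLast
            = (bPieces xs (x == 0)).flatMap (fun p => ':' :: p))]
      simp [(by simp [hx] : (x == 0) = false)]

-- ':'.join(p :: ps) = p ++ concat of (':' :: piece)
theorem join_colon (p : List Char) (ps : List (List Char)) :
    PySem.Chars.join [':'] (p :: ps) = p ++ ps.flatMap (fun q => ':' :: q) := by
  induction ps generalizing p with
  | nil => simp [PySem.Chars.join_singleton]
  | cons q qs ih => rw [PySem.Chars.join_cons_cons, ih q]; simp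

-- ===== VERDICT (by name: the statement is the Claim_ definition above) =====
theorem int_to_ipv6_spec : Claim_equal_int_to_ipv6 := by
  intro ip _
  unfold Spec_int_to_ipv6
  cases ip with
  | nil => decide
  | cons h t =>
    show int_to_ipv6 (h :: t) = int_to_ipv6_alt (h :: t)
    unfold int_to_ipv6 int_to_ipv6_alt
    have hlen : (0 : Int) < ((h :: t).length : Int) := by simp
    rw [PySem.List.pyRange_one_cons hlen, List.foldl_cons]
    have h0 : PySem.List.pyGetD (h :: t) (0 : Int) 0 = h := PySem.List.pyGetD_zero_cons h t 0
    simp only [(by simp : ((0 : Int) == 0) = true), if_pos, h0, List.nil_append]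
    rw [(by simp : (0 : Int) + 1 = ((1 : Nat) : Int)),
        foldA (h :: t) 1 le_rfl (pyHexChars h ++ [':'])]
    simp only [List.drop_one, List.tail_cons, show (1 : Nat) - 1 = 0 from rfl, List.getD_cons_zero]
    rw [PySem.List.slice_to_neg_one, List.append_assoc,
        List.dropLast_append_of_ne_nil (by simp), emitA_eq_bPieces t h, join_colon]
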